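-- pv_equiv track=rewrite | github.com/andychoi/nwc2abc | ai/train.py | _extract_bar_chord_pairs
-- ===== SOURCE A (Python) =====
-- from typing import List, Dict, Optional
--
-- def _extract_bar_chord_pairs(tokens: List[str]):
--     bar_positions: List[int] = []
--     chord_labels: List[str] = []
--     # For each <BarStart>, find the first <Chord_...> token that follows shortly
--     for i, tok in enumerate(tokens[:-1]):
--         if tok == "<BarStart>":
--             for j in range(i + 1, min(i + 16, len(tokens))):  # small lookahead window
--                 if tokens[j].startswith("<Chord_"):
--                     bar_positions.append(i)
--                     chord_labels.append(tokens[j])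
--                     break
--     return bar_positions, chord_labels
-- ===== SOURCE B (Python) =====
-- from typing import List
--
-- def _extract_bar_chord_pairs(tokens: List[str]):
--     # One backward pass: maintain the position of the nearest following chord token,
--     # emit pairs back-to-front, then reverse.
--     bar_positions: List[int] = []
--     chord_labels: List[str] = []
--     n = len(tokens)
--     next_chord = None  # smallest index > i holding a "<Chord_..." token
--     for i in range(n - 2, -1, -1):
--         if tokens[i + 1].startswith("<Chord_"):
--             next_chord = i + 1
--         if tokens[i] == "<BarStart>" and next_chord is not None and next_chord < i + 16:
--             bar_positions.append(i)
--             chord_labels.append(tokens[next_chord])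
--     bar_positions.reverse()
--     chord_labels.reverse()
--     return bar_positions, chord_labels
-- ===== Notes on version B (the rewrite author's own statement) =====
-- stated objective: alternative
-- what changed: Replaces the per-BarStart forward window rescan with a single backward pass that maintains the nearest following chord position, emitting pairs back-to-front and reversing at the end.
import Mathlib
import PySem

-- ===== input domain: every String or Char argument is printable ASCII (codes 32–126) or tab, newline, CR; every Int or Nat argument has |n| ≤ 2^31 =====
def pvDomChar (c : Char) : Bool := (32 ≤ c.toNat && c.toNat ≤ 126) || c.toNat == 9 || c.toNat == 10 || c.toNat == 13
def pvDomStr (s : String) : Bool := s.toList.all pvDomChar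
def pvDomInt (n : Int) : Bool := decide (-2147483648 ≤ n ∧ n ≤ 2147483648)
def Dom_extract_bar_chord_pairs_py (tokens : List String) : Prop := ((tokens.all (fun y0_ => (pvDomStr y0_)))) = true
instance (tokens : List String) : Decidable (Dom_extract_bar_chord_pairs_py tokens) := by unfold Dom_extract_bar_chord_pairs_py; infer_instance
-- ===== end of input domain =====

-- B replaces A's per-BarStart forward window rescan by one backward pass that tracks the
-- nearest following chord position (objective: alternative, same linear cost).

-- shared helper: tokens[j].startswith("<Chord_")
def pvChordAt (tokens : List String) (j : Int) : Bool :=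
  PySem.Str.startswith (PySem.List.pyGetD tokens j "") "<Chord_"

-- ===== PORT A =====
-- inner loop: for j in range(i+1, min(i+16, len(tokens))): … break
def pvAInner (tokens : List String) (i : Int) (js : List Int) (bp : List Int) (cl : List String) :
    List Int × List String :=
  match js with
  | [] => (bp, cl)
  | j :: rest =>
    if pvChordAt tokens j then (bp ++ [i], cl ++ [PySem.List.pyGetD tokens j ""])
    else pvAInner tokens i rest bp cl

-- outer loop: for i, tok in enumerate(tokens[:-1]): …
def pvAOuter (tokens : List String) (en : List (Int × String)) (bp : List Int) (cl : List String) :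
    List Int × List String :=
  match en with
  | [] => (bp, cl)
  | (i, tok) :: rest =>
    if tok = "<BarStart>" then
      let r := pvAInner tokens i
        (PySem.List.pyRange (i + 1) (min (i + 16) (PySem.List.len tokens))) bp cl
      pvAOuter tokens rest r.1 r.2
    else pvAOuter tokens rest bp cl

def extract_bar_chord_pairs_py (tokens : List String) : List Int × List String :=
  pvAOuter tokens (PySem.List.enumerate (PySem.List.slice tokens none (some (-1)))) [] []

-- ===== PORT B =====
-- for i in range(n-2, -1, -1): update next_chord; maybe append; finally reverse both lists
def pvBLoop (tokens : List String) (r : List Int) (nc : Option Int) (bp : List Int) (cl : List String) :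
    List Int × List String :=
  match r with
  | [] => (bp, cl)
  | i :: rest =>
    let nc' := if pvChordAt tokens (i + 1) then some (i + 1) else nc
    match nc' with
    | some p =>
      if PySem.List.pyGetD tokens i "" = "<BarStart>" ∧ p < i + 16 then
        pvBLoop tokens rest nc' (bp ++ [i]) (cl ++ [PySem.List.pyGetD tokens p ""])
      else pvBLoop tokens rest nc' bp cl
    | none => pvBLoop tokens rest nc' bp cl

def extract_bar_chord_pairs_py_alt (tokens : List String) : List Int × List String :=
  let r := pvBLoop tokens (PySem.List.pyRange (PySem.List.len tokens - 2) (-1) (-1)) none [] []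
  (r.1.reverse, r.2.reverse)

-- ===== PRECONDITION & SPEC =====
def Spec_extract_bar_chord_pairs_py (tokens : List String) (out : List Int × List String) : Prop := out = extract_bar_chord_pairs_py_alt tokens
instance (tokens : List String) (out : List Int × List String) : Decidable (Spec_extract_bar_chord_pairs_py tokens out) := by unfold Spec_extract_bar_chord_pairs_py; infer_instance

-- ===== CLAIM (what is proved, stated in full; the proofs are below) =====
def Claim_equal_extract_bar_chord_pairs_py : Prop := ∀ (tokens : List String), Dom_extract_bar_chord_pairs_py tokens → Spec_extract_bar_chord_pairs_py tokens (extract_bar_chord_pairs_py tokens)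

-- ===== LEMMAS AND PROOFS =====

-- first chord position in A's lookahead window of index i
def pvF (tokens : List String) (i : Int) : Option Int :=
  (PySem.List.pyRange (i + 1) (min (i + 16) (PySem.List.len tokens))).find? (pvChordAt tokens)

-- the emitted pair of index i, if any
def pvStep (tokens : List String) (i : Int) : Option (Int × String) :=
  if PySem.List.pyGetD tokens i "" = "<BarStart>" then
    (pvF tokens i).map (fun j => (i, PySem.List.pyGetD tokens j ""))
  else none

def pvPairs (tokens : List String) : List (Int × String) :=
  (PySem.List.pyRange 0 (PySem.List.len tokens - 1)).filterMap (pvStep tokens)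

-- first chord position at or after j
def pvNc (tokens : List String) (j : Int) : Option Int :=
  (PySem.List.pyRange j (PySem.List.len tokens)).find? (pvChordAt tokens)

theorem pvAInner_eq (tokens : List String) (i : Int) (js : List Int) (bp : List Int) (cl : List String) :
    pvAInner tokens i js bp cl =
      match js.find? (pvChordAt tokens) with
      | some j => (bp ++ [i], cl ++ [PySem.List.pyGetD tokens j ""])
      | none => (bp, cl) := by
  induction js with
  | nil => rfl
  | cons j rest ih =>
    by_cases h : pvChordAt tokens j
    · simp [pvAInner, h, List.find?_cons_of_pos]
    · simp [pvAInner, h, List.find?_cons_of_neg, ih]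

theorem pvAOuter_eq (tokens : List String) : ∀ (c : Nat) (s : Int) (bp : List Int) (cl : List String),
    pvAOuter tokens
        ((PySem.List.pyRange s (s + c)).map (fun j => (j, PySem.List.pyGetD tokens j ""))) bp cl =
      (bp ++ ((PySem.List.pyRange s (s + c)).filterMap (pvStep tokens)).map Prod.fst,
       cl ++ ((PySem.List.pyRange s (s + c)).filterMap (pvStep tokens)).map Prod.snd) := by
  intro c
  induction c with
  | zero => intro s bp cl; simp [PySem.List.pyRange_one_eq_nil (le_refl s), pvAOuter]
  | succ c ih =>
    intro s bp cl
    have hlt : s < s + (c + 1 : Nat) := by push_cast; omega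
    rw [PySem.List.pyRange_one_cons hlt]
    have hshift : s + (c + 1 : Nat) = (s + 1) + (c : Nat) := by push_cast; ring
    by_cases hb : PySem.List.pyGetD tokens s "" = "<BarStart>"
    · simp only [List.map_cons, pvAOuter, hb, if_true, pvAInner_eq]
      have hf : (PySem.List.pyRange (s + 1) (min (s + 16) (PySem.List.len tokens))).find?
          (pvChordAt tokens) = pvF tokens s := rfl
      rw [hf]
      cases hF : pvF tokens s with
      | some j =>
        have hstep : pvStep tokens s = some (s, PySem.List.pyGetD tokens j "") := by
          simp [pvStep, hb, hF]
        dsimp only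
        rw [List.filterMap_cons, hstep, hshift, ih]
        simp
      | none =>
        have hstep : pvStep tokens s = none := by simp [pvStep, hb, hF]
        dsimp only
        rw [List.filterMap_cons, hstep, hshift, ih]
    · rw [List.map_cons]
      simp only [pvAOuter, hb, if_false]
      have hstep : pvStep tokens s = none := by simp [pvStep, hb]
      rw [List.filterMap_cons, hstep, hshift, ih]

theorem pvEnum_dropLast (tokens : List String) :
    PySem.List.enumerate (PySem.List.slice tokens none (some (-1))) =
      (PySem.List.pyRange 0 (PySem.List.len tokens - 1)).map
        (fun j => (j, PySem.List.pyGetD tokens j "")) := by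
  rw [PySem.List.slice_to_neg_one, PySem.List.enumerate_eq_map_pyRange _ ""]
  cases tokens with
  | nil => simp [PySem.List.len, PySem.List.pyRange_one_eq_nil]
  | cons t ts =>
    have hlen : PySem.List.len (t :: ts).dropLast = PySem.List.len (t :: ts) - 1 := by
      simp [PySem.List.len]
    rw [hlen]
    apply List.map_congr_left
    intro j hj
    rw [PySem.List.mem_pyRange_one] at hj
    have h0 : (0:Int) ≤ j := hj.1
    have hlt : j.toNat < ts.length := by
      have := hj.2
      rw [PySem.List.len_eq] at this
      simp at this
      omega
    rw [PySem.List.pyGetD_of_nonneg _ _ h0, PySem.List.pyGetD_of_nonneg _ _ h0]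
    congr 1
    rw [List.getD_eq_getElem?_getD, List.getD_eq_getElem?_getD, List.getElem?_dropLast]
    simp [hlt]

-- the window search of index i, phrased through the "next chord at or after i+1" position
theorem pvF_eq_nc (tokens : List String) (i : Int) (_h0 : 0 ≤ i)
    (h1 : i ≤ PySem.List.len tokens - 2) :
    pvF tokens i =
      match pvNc tokens (i + 1) with
      | some p => if p < i + 16 then some p else none
      | none => none := by
  have hmin1 : i + 1 ≤ min (i + 16) (PySem.List.len tokens) := by
    simp only [le_min_iff]; omega
  have hmin2 : min (i + 16) (PySem.List.len tokens) ≤ PySem.List.len tokens := min_le_right _ _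
  have hsplit := PySem.List.pyRange_one_append (i + 1) (min (i + 16) (PySem.List.len tokens))
    (PySem.List.len tokens) hmin1 hmin2
  unfold pvNc pvF
  rw [hsplit, List.find?_append]
  cases hw : (PySem.List.pyRange (i + 1) (min (i + 16) (PySem.List.len tokens))).find?
      (pvChordAt tokens) with
  | some j =>
    have hmem := List.mem_of_find?_eq_some hw
    rw [PySem.List.mem_pyRange_one] at hmem
    have : j < i + 16 := lt_of_lt_of_le hmem.2 (min_le_left _ _)
    simp [this]
  | none =>
    simp only [Option.or]
    cases ht : (PySem.List.pyRange (min (i + 16) (PySem.List.len tokens))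
        (PySem.List.len tokens)).find? (pvChordAt tokens) with
    | some p =>
      have hmem := List.mem_of_find?_eq_some ht
      rw [PySem.List.mem_pyRange_one] at hmem
      by_cases hc : i + 16 ≤ PySem.List.len tokens
      · have : ¬ p < i + 16 := by
          have := hmem.1
          rw [min_eq_left hc] at this
          omega
        simp [this]
      · exfalso
        have : min (i + 16) (PySem.List.len tokens) = PySem.List.len tokens := by omega
        rw [this, PySem.List.pyRange_one_eq_nil (le_refl _)] at ht
        simp at ht
    | none => simp

theorem pvNc_cons (tokens : List String) (i : Int) (h : i + 1 < PySem.List.len tokens) :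
    pvNc tokens (i + 1) =
      if pvChordAt tokens (i + 1) then some (i + 1) else pvNc tokens (i + 2) := by
  unfold pvNc
  rw [PySem.List.pyRange_one_cons h]
  by_cases hc : pvChordAt tokens (i + 1)
  · simp [hc]
  · rw [List.find?_cons_of_neg (by simp [hc])]
    rw [show i + 1 + 1 = i + 2 by ring]
    simp [hc]

theorem pvBLoop_eq (tokens : List String) : ∀ (c : Nat) (i : Int) (bp : List Int) (cl : List String),
    i = (c : Int) - 1 → i ≤ PySem.List.len tokens - 2 →
    pvBLoop tokens (PySem.List.pyRange i (-1) (-1)) (pvNc tokens (i + 2)) bp cl =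
      (bp ++ (((PySem.List.pyRange 0 (i + 1)).filterMap (pvStep tokens)).map Prod.fst).reverse,
       cl ++ (((PySem.List.pyRange 0 (i + 1)).filterMap (pvStep tokens)).map Prod.snd).reverse) := by
  intro c
  induction c with
  | zero =>
    intro i bp cl hi _
    have : i = -1 := by omega
    subst this
    rw [PySem.List.pyRange_neg_one_eq_nil (by norm_num)]
    rw [PySem.List.pyRange_one_eq_nil (by norm_num)]
    simp [pvBLoop]
  | succ c ih =>
    intro i bp cl hi hle
    have h0 : 0 ≤ i := by omega
    rw [PySem.List.pyRange_neg_one_cons (by omega : (-1:Int) < i)]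
    have hcons := pvNc_cons tokens i (by omega)
    have hnc' : (if pvChordAt tokens (i + 1) then some (i + 1) else pvNc tokens (i + 2)) =
        pvNc tokens (i + 1) := hcons.symm
    have hF := pvF_eq_nc tokens i h0 hle
    have hsplitR : PySem.List.pyRange 0 (i + 1) =
        PySem.List.pyRange 0 i ++ [i] := by
      have := PySem.List.pyRange_one_append 0 i (i + 1) h0 (by omega)
      rw [this, PySem.List.pyRange_one_cons (by omega : i < i + 1),
        PySem.List.pyRange_one_eq_nil (by omega : i + 1 ≤ i + 1)]
    have hprev : i - 1 + 2 = i + 1 := by ring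
    have hprev2 : i - 1 + 1 = i := by ring
    have hIH : ∀ (bp' : List Int) (cl' : List String),
        pvBLoop tokens (PySem.List.pyRange (i - 1) (-1) (-1)) (pvNc tokens (i + 1)) bp' cl' =
          (bp' ++ (((PySem.List.pyRange 0 i).filterMap (pvStep tokens)).map Prod.fst).reverse,
           cl' ++ (((PySem.List.pyRange 0 i).filterMap (pvStep tokens)).map Prod.snd).reverse) := by
      intro bp' cl'
      have h := ih (i - 1) bp' cl' (by omega) (by omega)
      rw [hprev, hprev2] at h
      exact h
    cases hNc : pvNc tokens (i + 1) with
    | some p =>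
      have h2 : (if pvChordAt tokens (i + 1) then some (i + 1) else pvNc tokens (i + 2)) =
          some p := by rw [hnc', hNc]
      simp only [hNc] at hF hIH
      simp only [pvBLoop, h2]
      by_cases hbar : PySem.List.pyGetD tokens i "" = "<BarStart>"
      · by_cases hwin : p < i + 16
        · rw [if_pos ⟨hbar, hwin⟩, hIH]
          have hstep : pvStep tokens i = some (i, PySem.List.pyGetD tokens p "") := by
            simp [pvStep, hbar, hF, hwin]
          rw [hsplitR, List.filterMap_append]
          simp [hstep]
        · rw [if_neg (by tauto), hIH]
          have hstep : pvStep tokens i = none := by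
            simp [pvStep, hbar, hF, hwin]
          rw [hsplitR, List.filterMap_append]
          simp [hstep]
      · rw [if_neg (by tauto), hIH]
        have hstep : pvStep tokens i = none := by simp [pvStep, hbar]
        rw [hsplitR, List.filterMap_append]
        simp [hstep]
    | none =>
      have h2 : (if pvChordAt tokens (i + 1) then some (i + 1) else pvNc tokens (i + 2)) =
          none := by rw [hnc', hNc]
      simp only [hNc] at hF hIH
      simp only [pvBLoop, h2]
      rw [hIH]
      have hstep : pvStep tokens i = none := by simp [pvStep, hF]
      rw [hsplitR, List.filterMap_append]
      simp [hstep]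

theorem pvA_main (tokens : List String) :
    extract_bar_chord_pairs_py tokens =
      ((pvPairs tokens).map Prod.fst, (pvPairs tokens).map Prod.snd) := by
  unfold extract_bar_chord_pairs_py pvPairs
  rw [pvEnum_dropLast]
  cases tokens with
  | nil =>
    rw [show PySem.List.len ([] : List String) - 1 = -1 by rfl]
    rw [PySem.List.pyRange_one_eq_nil (by norm_num)]
    simp [pvAOuter]
  | cons t ts =>
    have hlen : PySem.List.len (t :: ts) - 1 = 0 + ((t :: ts).length - 1 : Nat) := by
      simp [PySem.List.len]
    rw [hlen, pvAOuter_eq]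
    simp

theorem pvB_main (tokens : List String) :
    extract_bar_chord_pairs_py_alt tokens =
      ((pvPairs tokens).map Prod.fst, (pvPairs tokens).map Prod.snd) := by
  unfold extract_bar_chord_pairs_py_alt pvPairs
  cases tokens with
  | nil =>
    rw [show PySem.List.len ([] : List String) - 2 = -2 by rfl]
    rw [PySem.List.pyRange_neg_one_eq_nil (by norm_num)]
    rw [show PySem.List.len ([] : List String) - 1 = -1 by rfl]
    rw [PySem.List.pyRange_one_eq_nil (by norm_num)]
    simp [pvBLoop]
  | cons t ts =>
    have hnone : (none : Option Int) = pvNc (t :: ts) (PySem.List.len (t :: ts) - 2 + 2) := by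
      unfold pvNc
      rw [show PySem.List.len (t :: ts) - 2 + 2 = PySem.List.len (t :: ts) by ring]
      rw [PySem.List.pyRange_one_eq_nil (le_refl _)]
      rfl
    have hloop := pvBLoop_eq (t :: ts) ((t :: ts).length - 1 : Nat)
      (PySem.List.len (t :: ts) - 2) [] []
      (by rw [PySem.List.len_eq]
          push_cast [Nat.cast_sub (by simp : 1 ≤ (t :: ts).length)]
          ring) (le_refl _)
    rw [show PySem.List.len (t :: ts) - 2 + 1 = PySem.List.len (t :: ts) - 1 by ring] at hloop
    rw [← hnone] at hloop
    simp only [hloop]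
    simp

-- ===== VERDICT (by name: the statement is the Claim_ definition above) =====
theorem extract_bar_chord_pairs_py_spec : Claim_equal_extract_bar_chord_pairs_py := by
  intro tokens _
  unfold Spec_extract_bar_chord_pairs_py
  rw [pvA_main, pvB_main]
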